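-- pv_equiv track=rewrite | github.com/tann200/CodingAgent | tests/unit/test_orchestrator_rules.py | _check_handled
-- ===== SOURCE A (Python) =====
-- def _check_handled(history, last_assistant):
--     """Replicate the orchestrator's 'handled' check."""
--     last_assistant_idx = None
--     for idx in range(len(history) - 1, -1, -1):
--         if history[idx].get("role") == "assistant" and history[idx].get("content") == last_assistant:
--             last_assistant_idx = idx
--             break
--
--     handled = False
--     if last_assistant_idx is not None:
--         for later in history[last_assistant_idx + 1:]:
--             if "tool_execution_result" in (later.get("content") or ""):
--                 handled = True
--                 break
--     return handled
-- ===== SOURCE B (Python) =====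
-- def _check_handled(history, last_assistant):
--     """Replicate the orchestrator's 'handled' check (single forward pass)."""
--     found = False
--     handled = False
--     for el in history:
--         if el.get("role") == "assistant" and el.get("content") == last_assistant:
--             found = True
--             handled = False
--         elif found and "tool_execution_result" in (el.get("content") or ""):
--             handled = True
--     return handled
-- ===== Notes on version B (the rewrite author's own statement) =====
-- stated objective: simpler
-- what changed: Replaces the backward index search for the last matching assistant message plus a second forward scan over the slice after it by one forward pass that keeps two booleans, resetting 'handled' whenever a later matching assistant message is seen.
import Mathlib
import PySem

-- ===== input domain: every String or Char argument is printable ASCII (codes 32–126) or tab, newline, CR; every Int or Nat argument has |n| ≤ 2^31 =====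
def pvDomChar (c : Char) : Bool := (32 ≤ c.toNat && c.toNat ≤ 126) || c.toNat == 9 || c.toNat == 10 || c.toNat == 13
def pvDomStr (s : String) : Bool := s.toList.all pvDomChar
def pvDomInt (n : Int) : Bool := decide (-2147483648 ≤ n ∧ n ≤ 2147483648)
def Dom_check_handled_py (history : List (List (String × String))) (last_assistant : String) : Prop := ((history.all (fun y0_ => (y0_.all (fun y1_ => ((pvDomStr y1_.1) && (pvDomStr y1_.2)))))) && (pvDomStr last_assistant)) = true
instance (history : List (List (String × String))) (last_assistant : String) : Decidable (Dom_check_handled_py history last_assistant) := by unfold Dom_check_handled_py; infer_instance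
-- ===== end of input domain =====

-- B replaces A's backward index search plus forward slice scan by one forward pass with two booleans; objective: simpler.

-- shared transliteration of the two identical Python subexpressions
-- `el.get("role") == "assistant" and el.get("content") == last_assistant`  and
-- `"tool_execution_result" in (el.get("content") or "")`   (None and "" both give "")
def pvIsMatch (el : List (String × String)) (last_assistant : String) : Bool :=
  ((PySem.Dict.mk el).get? "role" == some "assistant") &&
    ((PySem.Dict.mk el).get? "content" == some last_assistant)

def pvIsHit (el : List (String × String)) : Bool :=
  PySem.Str.isIn "tool_execution_result" ((PySem.Dict.mk el).getD "content" "")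

-- ===== PORT A =====
-- the backward `for idx in range(len(history)-1, -1, -1): … break` loop
def check_handled_py_find (history : List (List (String × String))) (last_assistant : String) :
    List Int → Option Int
  | [] => none
  | idx :: rest =>
    match PySem.List.pyGet? history idx with
    | some d =>
        if pvIsMatch d last_assistant then some idx
        else check_handled_py_find history last_assistant rest
    | none => check_handled_py_find history last_assistant rest  -- unreachable: range indices are in range

-- the forward `for later in history[idx+1:]: … break` loop
def check_handled_py_scan : List (List (String × String)) → Bool
  | [] => false
  | later :: rest =>
    if pvIsHit later then true else check_handled_py_scan rest

def check_handled_py (history : List (List (String × String))) (last_assistant : String) : Bool :=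
  match check_handled_py_find history last_assistant
      (PySem.List.pyRange ((history.length : Int) - 1) (-1) (-1)) with
  | none => false
  | some idx => check_handled_py_scan (PySem.List.slice history (some (idx + 1)) none)

-- ===== PORT B =====
def check_handled_py_alt (history : List (List (String × String))) (last_assistant : String) : Bool :=
  (history.foldl
    (fun st el =>
      if pvIsMatch el last_assistant then (true, false)
      else if st.1 && pvIsHit el then (st.1, true)
      else st)
    (false, false)).2

-- ===== PRECONDITION & SPEC =====
def Spec_check_handled_py (history : List (List (String × String))) (last_assistant : String) (out : Bool) : Prop := out = check_handled_py_alt history last_assistant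
instance (history : List (List (String × String))) (last_assistant : String) (out : Bool) : Decidable (Spec_check_handled_py history last_assistant out) := by unfold Spec_check_handled_py; infer_instance

-- ===== CLAIM (what is proved, stated in full; the proofs are below) =====
def Claim_equal_check_handled_py : Prop := ∀ (history : List (List (String × String))) (last_assistant : String), Dom_check_handled_py history last_assistant → Spec_check_handled_py history last_assistant (check_handled_py history last_assistant)

-- ===== LEMMAS AND PROOFS =====

lemma pv_scan_append (xs : List (List (String × String))) (d : List (String × String)) :
    check_handled_py_scan (xs ++ [d]) = (check_handled_py_scan xs || pvIsHit d) := by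
  induction xs with
  | nil => simp [check_handled_py_scan]
  | cons x t ih => by_cases h : pvIsHit x <;> simp [check_handled_py_scan, h, ih]

lemma pv_find_congr (l : List (List (String × String))) (d : List (String × String))
    (la : String) (idxs : List Int)
    (h : ∀ i ∈ idxs, 0 ≤ i ∧ i < (l.length : Int)) :
    check_handled_py_find (l ++ [d]) la idxs = check_handled_py_find l la idxs := by
  induction idxs with
  | nil => rfl
  | cons i rest ih =>
    have hi := h i (by simp)
    have hget : PySem.List.pyGet? (l ++ [d]) i = PySem.List.pyGet? l i := by
      rw [PySem.List.pyGet?_eq_some_getElem (xs := l ++ [d]) hi.1 (by simp; omega),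
          PySem.List.pyGet?_eq_some_getElem (xs := l) hi.1 (by omega)]
      congr 1
      exact List.getElem_append_left (by omega)
    simp only [check_handled_py_find, hget]
    cases PySem.List.pyGet? l i with
    | none => exact ih fun j hj => h j (by simp [hj])
    | some y =>
      by_cases hm : pvIsMatch y la <;>
        simp [hm, ih fun j hj => h j (by simp [hj])]

lemma pv_find_some (l : List (List (String × String))) (la : String) (idxs : List Int) (i : Int)
    (h : check_handled_py_find l la idxs = some i) :
    i ∈ idxs ∧ ∃ el, PySem.List.pyGet? l i = some el ∧ pvIsMatch el la = true := by
  induction idxs with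
  | nil => simp [check_handled_py_find] at h
  | cons j rest ih =>
    simp only [check_handled_py_find] at h
    cases hg : PySem.List.pyGet? l j with
    | none =>
      rw [hg] at h
      obtain ⟨hmem, rest'⟩ := ih h
      exact ⟨by simp [hmem], rest'⟩
    | some y =>
      rw [hg] at h
      by_cases hm : pvIsMatch y la
      · simp [hm] at h
        subst h
        exact ⟨by simp, y, hg, hm⟩
      · simp [hm] at h
        obtain ⟨hmem, rest'⟩ := ih h
        exact ⟨by simp [hmem], rest'⟩

lemma pv_find_none (l : List (List (String × String))) (la : String) (idxs : List Int)
    (h : check_handled_py_find l la idxs = none) :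
    ∀ i ∈ idxs, ∀ el, PySem.List.pyGet? l i = some el → pvIsMatch el la = false := by
  induction idxs with
  | nil => simp
  | cons j rest ih =>
    simp only [check_handled_py_find] at h
    intro i hi el hel
    cases hg : PySem.List.pyGet? l j with
    | none =>
      rw [hg] at h
      rcases List.mem_cons.mp hi with rfl | hi'
      · rw [hg] at hel; cases hel
      · exact ih h i hi' el hel
    | some y =>
      rw [hg] at h
      by_cases hm : pvIsMatch y la
      · simp [hm] at h
      · simp [hm] at h
        rcases List.mem_cons.mp hi with rfl | hi'
        · rw [hg] at hel
          cases hel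
          exact Bool.eq_false_iff.mpr hm
        · exact ih h i hi' el hel

lemma pv_any_false_of_find_none (l : List (List (String × String))) (la : String)
    (h : check_handled_py_find l la (PySem.List.pyRange ((l.length : Int) - 1) (-1) (-1)) = none) :
    l.any (fun el => pvIsMatch el la) = false := by
  by_contra hc
  rw [Bool.not_eq_false, List.any_eq_true] at hc
  obtain ⟨x, hx, hm⟩ := hc
  obtain ⟨j, hj, rfl⟩ := List.mem_iff_getElem.mp hx
  have hmem : (j : Int) ∈ PySem.List.pyRange ((l.length : Int) - 1) (-1) (-1) := by
    rw [PySem.List.mem_pyRange_neg_one]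
    omega
  have hget : PySem.List.pyGet? l (j : Int) = some l[j] := by
    rw [PySem.List.pyGet?_eq_some_getElem l (i := (j : Int)) (by omega) (by omega)]
    simp
  have := pv_find_none l la _ h _ hmem _ hget
  simp_all

-- fst of B's fold is "a matching assistant message has been seen"
lemma pv_fold_fst (l : List (List (String × String))) (la : String) (f h : Bool) :
    (l.foldl
      (fun st el =>
        if pvIsMatch el la then (true, false)
        else if st.1 && pvIsHit el then (st.1, true)
        else st)
      (f, h)).1 = (f || l.any (fun el => pvIsMatch el la)) := by
  induction l generalizing f h with
  | nil => simp
  | cons x t ih =>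
    rw [List.foldl_cons]
    by_cases hm : pvIsMatch x la = true
    · rw [if_pos hm, ih]; simp [hm]
    · rw [if_neg hm]
      by_cases hh : (f && pvIsHit x) = true
      · rw [if_pos hh, ih]; simp [hm]
      · rw [if_neg hh, ih]; simp [hm]

lemma pv_main (l : List (List (String × String))) (la : String) :
    check_handled_py l la = check_handled_py_alt l la := by
  induction l using List.reverseRecOn with
  | nil => rfl
  | append_singleton l d ih =>
    have hrange :
        PySem.List.pyRange (((l ++ [d]).length : Int) - 1) (-1) (-1)
          = (l.length : Int) :: PySem.List.pyRange ((l.length : Int) - 1) (-1) (-1) := by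
      have : (((l ++ [d]).length : Int) - 1) = (l.length : Int) := by simp
      rw [this, PySem.List.pyRange_neg_one_cons (by omega)]
    have hgetd : PySem.List.pyGet? (l ++ [d]) (l.length : Int) = some d := by
      exact PySem.List.pyGet?_append_length l [] d
    unfold check_handled_py_alt at ih ⊢
    rw [List.foldl_append]
    have hfold :
        (l.foldl
          (fun st el =>
            if pvIsMatch el la then (true, false)
            else if st.1 && pvIsHit el then (st.1, true)
            else st)
          (false, false))
        = (l.any (fun el => pvIsMatch el la), check_handled_py l la) := by
      rw [Prod.ext_iff]
      exact ⟨by simpa using pv_fold_fst l la false false, by simpa using ih.symm⟩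
    rw [hfold]
    unfold check_handled_py
    rw [hrange]
    simp only [check_handled_py_find, hgetd, List.foldl_cons, List.foldl_nil]
    cases hm : pvIsMatch d la
    case true =>
      -- the new element is the last matching assistant message: suffix after it is empty
      simp only [if_true]
      have : PySem.List.slice (l ++ [d]) (some ((l.length : Int) + 1)) none = [] := by
        rw [PySem.List.slice_from (l ++ [d]) (show (0:Int) ≤ (l.length : Int) + 1 by omega)]
        apply List.drop_eq_nil_of_le
        simp
      simp [this, check_handled_py_scan]
    case false =>
      simp only [Bool.false_eq_true, if_false]
      have hcongr := pv_find_congr l d la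
        (PySem.List.pyRange ((l.length : Int) - 1) (-1) (-1))
        (fun i hi => by
          rw [PySem.List.mem_pyRange_neg_one] at hi; omega)
      rw [hcongr]
      cases hfind : check_handled_py_find l la
          (PySem.List.pyRange ((l.length : Int) - 1) (-1) (-1)) with
      | none =>
        have hany := pv_any_false_of_find_none l la hfind
        simp [hany]
      | some i =>
        obtain ⟨hmem, el, hget, hmatch⟩ := pv_find_some l la _ i hfind
        rw [PySem.List.mem_pyRange_neg_one] at hmem
        have hany : l.any (fun el => pvIsMatch el la) = true := by
          rw [List.any_eq_true]
          exact ⟨el, PySem.List.mem_of_pyGet?_eq_some _ hget, hmatch⟩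
        have hslice : PySem.List.slice (l ++ [d]) (some (i + 1)) none
            = PySem.List.slice l (some (i + 1)) none ++ [d] := by
          rw [PySem.List.slice_from (l ++ [d]) (show (0:Int) ≤ i + 1 by omega),
              PySem.List.slice_from l (show (0:Int) ≤ i + 1 by omega)]
          rw [List.drop_append_of_le_length (by omega)]
        simp only [hslice, pv_scan_append, hany, Bool.true_and]
        by_cases hh : pvIsHit d <;> simp [hh]

-- ===== VERDICT (by name: the statement is the Claim_ definition above) =====
theorem check_handled_py_spec : Claim_equal_check_handled_py := by
  intro history la _
  unfold Spec_check_handled_py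
  exact pv_main history la
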